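-- pv_equiv track=rewrite | github.com/YomnaAlaa/bio-assignment | assignment 3.py | MassSpectrum
-- ===== SOURCE A (Python) =====
-- Antibiotics = {
--     'G':57,
--     'A':71,
--     'S':87,
--     'P':97,
--     'V':99,
--     'T':101,
--     'C':103,
--     'I':113,
--     'L':113,
--     'N':114,
--     'D':115,
--     'K':128,
--     'Q':128,
--     'E':129,
--     'M':131,
--     'H':137,
--     'F':147,
--     'R':156,
--     'Y':163,
--     'W':186
-- }
--
-- def MassSpectrum (peptide):
--     length = len(peptide)
--     summ = 0
--     J = 1
--     for i in range (0, length, 1):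
--         summ = summ + Antibiotics[peptide[i:J]]
--         J = J+1
--     return summ
-- ===== SOURCE B (Python) =====
-- Antibiotics = {
--     'G':57,
--     'A':71,
--     'S':87,
--     'P':97,
--     'V':99,
--     'T':101,
--     'C':103,
--     'I':113,
--     'L':113,
--     'N':114,
--     'D':115,
--     'K':128,
--     'Q':128,
--     'E':129,
--     'M':131,
--     'H':137,
--     'F':147,
--     'R':156,
--     'Y':163,
--     'W':186
-- }
--
-- def MassSpectrum(peptide):
--     freq = {}
--     for residue in peptide:
--         freq[residue] = freq.get(residue, 0) + 1
--     return sum(count * Antibiotics[residue] for residue, count in freq.items())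
-- ===== Notes on version B (the rewrite author's own statement) =====
-- stated objective: alternative
-- what changed: B builds a frequency table of the peptide's residues in one pass and sums count * mass over the distinct residues, instead of A's index loop that slices out each one-character substring and adds its mass per position.
import Mathlib
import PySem

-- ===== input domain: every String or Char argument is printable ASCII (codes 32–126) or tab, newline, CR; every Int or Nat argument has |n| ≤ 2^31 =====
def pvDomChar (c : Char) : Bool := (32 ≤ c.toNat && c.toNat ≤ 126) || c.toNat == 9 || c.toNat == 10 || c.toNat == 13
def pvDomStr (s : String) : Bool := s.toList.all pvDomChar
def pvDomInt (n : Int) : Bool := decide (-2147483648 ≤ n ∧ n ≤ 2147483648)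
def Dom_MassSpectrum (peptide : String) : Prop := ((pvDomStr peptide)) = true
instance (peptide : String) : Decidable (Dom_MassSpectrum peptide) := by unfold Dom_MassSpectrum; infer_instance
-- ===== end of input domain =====

-- B sums count * mass over a one-pass frequency table of the residues instead of A's
-- per-position slice-and-add loop; objective: alternative decomposition, same cost.

-- ===== PORT A =====
def antibioticsA : PySem.Dict String Int := PySem.Dict.ofList
  [("G",57),("A",71),("S",87),("P",97),("V",99),("T",101),("C",103),("I",113),("L",113),
   ("N",114),("D",115),("K",128),("Q",128),("E",129),("M",131),("H",137),("F",147),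
   ("R",156),("Y",163),("W",186)]

-- A: summ = 0; J = 1; for i in range(0, length, 1): summ += Antibiotics[peptide[i:J]]; J += 1
-- (Antibiotics[…] raises KeyError on an unknown residue: those inputs are outside Pre_;
--  the port reads the dict with default 0 there, exact on Pre_.)
def MassSpectrum (peptide : String) : Int :=
  let length : Int := PySem.Str.len peptide
  ((PySem.List.pyRange 0 length 1).foldl
      (fun (st : Int × Int) i =>
        (st.1 + antibioticsA.getD (String.ofList (PySem.List.slice peptide.toList (some i) (some st.2))) 0,
         st.2 + 1))
      (0, 1)).1

-- ===== PORT B =====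
-- B's Antibiotics lookups are by single residue character, so the table is keyed by Char.
def massTable : PySem.Dict Char Int := PySem.Dict.ofList
  [('G',57),('A',71),('S',87),('P',97),('V',99),('T',101),('C',103),('I',113),('L',113),
   ('N',114),('D',115),('K',128),('Q',128),('E',129),('M',131),('H',137),('F',147),
   ('R',156),('Y',163),('W',186)]

def MassSpectrum_alt (peptide : String) : Int :=
  let freq := peptide.toList.foldl (fun d c => d.insert c (d.getD c 0 + 1)) PySem.Dict.empty
  freq.items.foldl (fun s p => s + p.2 * massTable.getD p.1 0) 0

-- ===== PRECONDITION & SPEC =====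
def pvResidues : List Char :=
  ['G','A','S','P','V','T','C','I','L','N','D','K','Q','E','M','H','F','R','Y','W']

-- Pre_ excludes exactly the inputs with a character outside the 20 residue keys, on which
-- the Python A raises KeyError (B raises the same KeyError there).
def Pre_MassSpectrum (peptide : String) : Prop := peptide.toList.all (fun c => pvResidues.contains c) = true
instance (peptide : String) : Decidable (Pre_MassSpectrum peptide) := by
  unfold Pre_MassSpectrum; infer_instance

def pvWitness_MassSpectrum : String := "GASP"

def Spec_MassSpectrum (peptide : String) (out : Int) : Prop := out = MassSpectrum_alt peptide
instance (peptide : String) (out : Int) : Decidable (Spec_MassSpectrum peptide out) := by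
  unfold Spec_MassSpectrum; infer_instance

-- ===== CLAIM (what is proved, stated in full; the proofs are below) =====
def Claim_equal_MassSpectrum : Prop := ∀ (peptide : String), Dom_MassSpectrum peptide → Pre_MassSpectrum peptide → Spec_MassSpectrum peptide (MassSpectrum peptide)

-- ===== LEMMAS AND PROOFS =====

-- mass of one residue, as A computes it (one-character slice keyed as a string)
def mA (c : Char) : Int := antibioticsA.getD (String.ofList [c]) 0
-- mass of one residue, as B computes it
def mB (c : Char) : Int := massTable.getD c 0

lemma mA_eq_mB {c : Char} (h : c ∈ pvResidues) : mA c = mB c := by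
  simp only [pvResidues, List.mem_cons, List.not_mem_nil, or_false] at h
  rcases h with rfl|rfl|rfl|rfl|rfl|rfl|rfl|rfl|rfl|rfl|rfl|rfl|rfl|rfl|rfl|rfl|rfl|rfl|rfl|rfl <;> decide

-- A's loop: at step i the second state component J equals i + 1, and the one-character
-- slice cs[i:i+1] is the i-th character; unrolled into a sum of mA over the suffix.
lemma loopA (n : Nat) : ∀ (cs : List Char) (k : Nat), cs.length - k = n → ∀ (s : Int),
    ((PySem.List.pyRange (k : Int) (cs.length : Int) 1).foldl
        (fun (st : Int × Int) i =>
          (st.1 + antibioticsA.getD (String.ofList (PySem.List.slice cs (some i) (some st.2))) 0,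
           st.2 + 1))
        (s, (k : Int) + 1)).1
      = s + ((cs.drop k).map mA).sum := by
  induction n with
  | zero =>
    intro cs k hk s
    have hle : cs.length ≤ k := by omega
    rw [PySem.List.pyRange_one_eq_nil (by exact_mod_cast hle)]
    simp [List.drop_eq_nil_of_le hle]
  | succ n ih =>
    intro cs k hk s
    have hlt : k < cs.length := by omega
    rw [PySem.List.pyRange_one_cons (by exact_mod_cast hlt)]
    simp only [List.foldl_cons]
    have hslice : PySem.List.slice cs (some (k : Int)) (some ((k : Int) + 1)) = [cs[k]] := by
      have := PySem.List.slice_natCast_add cs k 1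
      push_cast at this
      rw [this, List.drop_eq_getElem_cons hlt, List.take_succ_cons, List.take_zero]
    have hrec := ih cs (k + 1) (by omega)
      (s + antibioticsA.getD (String.ofList (PySem.List.slice cs (some (k : Int)) (some ((k : Int) + 1)))) 0)
    push_cast at hrec
    rw [show ((k : Int) + 1 + 1) = ((k : Int) + 1) + 1 by ring] at hrec
    rw [hrec, hslice]
    conv_rhs => rw [List.drop_eq_getElem_cons hlt]
    rw [List.map_cons, List.sum_cons]
    show _ = s + (mA cs[k] + _)
    rw [mA]
    ring

lemma massA_sum (peptide : String) :
    MassSpectrum peptide = (peptide.toList.map mA).sum := by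
  have h := loopA (peptide.toList.length) peptide.toList 0 (by omega) 0
  simpa [MassSpectrum, PySem.Str.len_eq] using h

lemma massB_sum (peptide : String) :
    MassSpectrum_alt peptide = (peptide.toList.map mB).sum := by
  rw [show MassSpectrum_alt peptide
        = (PySem.Dict.counter peptide.toList).items.foldl
            (fun s p => s + p.2 * massTable.getD p.1 0) 0 from rfl]
  rw [PySem.Dict.items_counter, PySem.List.foldl_add]
  rw [List.map_map]
  have hnd := PySem.Set.nodup_ofList peptide.toList
  have htf : (PySem.Set.ofList peptide.toList).toFinset = peptide.toList.toFinset := by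
    ext c; simp [PySem.Set.mem_ofList]
  calc 0 + ((PySem.Set.ofList peptide.toList).map
        ((fun p : Char × Int => p.2 * massTable.getD p.1 0) ∘ fun k => (k, (peptide.toList.count k : Int)))).sum
      = ∑ c ∈ (PySem.Set.ofList peptide.toList).toFinset,
          (peptide.toList.count c : Int) * mB c := by
        rw [List.sum_toFinset _ hnd]; simp [Function.comp_def, mB]
    _ = ∑ c ∈ peptide.toList.toFinset, peptide.toList.count c • mB c := by
        rw [htf]; refine Finset.sum_congr rfl fun c _ => ?_
        simp
    _ = (peptide.toList.map mB).sum := (Finset.sum_list_map_count _ _).symm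

-- ===== VERDICT (by name: the statement is the Claim_ definition above) =====
theorem MassSpectrum_spec : Claim_equal_MassSpectrum := by
  intro peptide _ hpre
  unfold Pre_MassSpectrum at hpre
  rw [List.all_eq_true] at hpre
  unfold Spec_MassSpectrum
  rw [massA_sum, massB_sum]
  exact congrArg List.sum
    (List.map_congr_left fun c hc => mA_eq_mB (by simpa using hpre c hc))
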